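-- pv_equiv track=rewrite | github.com/GoogleCloudPlatform/blueprints | csr-git-ops-pipeline-status/src/cloudbuild.py | get_relevant_errors
-- ===== SOURCE A (Python) =====
-- def get_relevant_errors(log_entries):
--   logs = ""
--   initial_error_found = False
--   for entry in log_entries:
--     if initial_error_found or "error" in entry.lower():
--       initial_error_found = True
--       logs += "{}\n".format(entry)
--   return logs
-- ===== SOURCE B (Python) =====
-- def get_relevant_errors(log_entries):
--   idx = next((i for i, e in enumerate(log_entries) if "error" in e.lower()), None)
--   if idx is None:
--     return ""
--   return "".join("{}\n".format(e) for e in log_entries[idx:])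
-- ===== Notes on version B (the rewrite author's own statement) =====
-- stated objective: simpler
-- what changed: Replaces the latch-flag-and-accumulate loop with a find-the-first-error-index step followed by joining the tail slice; no boolean state or string accumulator.
import Mathlib
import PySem

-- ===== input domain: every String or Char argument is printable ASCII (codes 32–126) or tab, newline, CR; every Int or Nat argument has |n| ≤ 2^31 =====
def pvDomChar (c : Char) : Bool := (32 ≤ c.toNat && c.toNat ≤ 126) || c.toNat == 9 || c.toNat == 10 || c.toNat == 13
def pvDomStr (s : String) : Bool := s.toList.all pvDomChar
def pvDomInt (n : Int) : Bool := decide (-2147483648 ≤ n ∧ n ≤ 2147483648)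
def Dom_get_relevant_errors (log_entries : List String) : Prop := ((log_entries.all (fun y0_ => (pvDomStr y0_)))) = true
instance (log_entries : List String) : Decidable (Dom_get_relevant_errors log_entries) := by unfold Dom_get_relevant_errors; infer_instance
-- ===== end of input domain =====

-- B replaces A's latch-flag accumulation loop by finding the index of the first
-- entry containing "error" and joining the tail slice (objective: simpler).


-- ===== PORT A =====
-- the for-loop over log_entries carrying (logs, initial_error_found);
-- string concatenation is done on List Char (Lean's String.append is opaque to the kernel)
def garLoopA : List String → List Char → Bool → List Char
  | [], logs, _ => logs
  | entry :: rest, logs, flag =>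
    if flag || PySem.Str.isIn "error" (PySem.Str.lower entry) then
      garLoopA rest (logs ++ entry.toList ++ ['\n']) true
    else
      garLoopA rest logs flag

def get_relevant_errors (log_entries : List String) : String :=
  String.ofList (garLoopA log_entries [] false)

-- ===== PORT B =====
-- idx = next((i for i, e in enumerate(log_entries) if "error" in e.lower()), None)
-- if None: return ""; else "".join("{}\n".format(e) for e in log_entries[idx:])
def get_relevant_errors_alt (log_entries : List String) : String :=
  match log_entries.findIdx? (fun e => PySem.Str.isIn "error" (PySem.Str.lower e)) with
  | none => ""
  | some idx =>
      PySem.Str.join ""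
        ((PySem.List.slice log_entries (some (idx : Int)) none).map
          (fun e => String.ofList (e.toList ++ ['\n'])))

-- ===== PRECONDITION & SPEC =====
def Spec_get_relevant_errors (log_entries : List String) (out : String) : Prop := out = get_relevant_errors_alt log_entries
instance (log_entries : List String) (out : String) : Decidable (Spec_get_relevant_errors log_entries out) := by unfold Spec_get_relevant_errors; infer_instance

-- ===== CLAIM (what is proved, stated in full; the proofs are below) =====
def Claim_equal_get_relevant_errors : Prop := ∀ (log_entries : List String), Dom_get_relevant_errors log_entries → Spec_get_relevant_errors log_entries (get_relevant_errors log_entries)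

-- ===== LEMMAS AND PROOFS =====

-- joining with the empty separator is flattening
theorem pv_join_empty (xs : List (List Char)) : PySem.Chars.join [] xs = xs.flatten := by
  induction xs with
  | nil => simp [PySem.Chars.join_nil]
  | cons p rest ih =>
    cases rest with
    | nil => simp [PySem.Chars.join_singleton]
    | cons q r => simpa [PySem.Chars.join_cons_cons] using ih

-- the accumulator is a pure prefix
theorem garLoopA_acc (l : List String) (acc : List Char) (flag : Bool) :
    garLoopA l acc flag = acc ++ garLoopA l [] flag := by
  induction l generalizing acc flag with
  | nil => simp [garLoopA]
  | cons e rest ih =>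
    by_cases h : (flag || PySem.Str.isIn "error" (PySem.Str.lower e)) = true
    · simp only [garLoopA, h, if_true]
      rw [ih (acc ++ e.toList ++ ['\n']) true,
        ih (([] : List Char) ++ e.toList ++ ['\n']) true]
      simp
    · simp only [garLoopA, h]
      exact ih acc flag

-- once the flag is set, everything is appended
theorem garLoopA_true (l : List String) :
    garLoopA l [] true = (l.map (fun e => e.toList ++ ['\n'])).flatten := by
  induction l with
  | nil => simp [garLoopA]
  | cons e rest ih =>
    simp only [garLoopA, Bool.true_or, if_true]
    rw [garLoopA_acc]
    simp [ih]

-- characterisation of the flag-false loop via the first matching index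
theorem garLoopA_false (l : List String) :
    garLoopA l [] false =
      match l.findIdx? (fun e => PySem.Str.isIn "error" (PySem.Str.lower e)) with
      | none => []
      | some idx => ((l.drop idx).map (fun e => e.toList ++ ['\n'])).flatten := by
  induction l with
  | nil => simp [garLoopA]
  | cons e rest ih =>
    by_cases h : PySem.Str.isIn "error" (PySem.Str.lower e) = true
    · simp only [garLoopA, h, Bool.false_or, if_true]
      rw [garLoopA_acc, garLoopA_true]
      simp only [List.findIdx?_cons, h, if_true, List.drop_zero, List.map_cons,
        List.flatten_cons]
      simp
    · simp only [garLoopA, h, Bool.false_or]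
      rw [ih]
      simp only [List.findIdx?_cons, h]
      cases hr : rest.findIdx? (fun e => PySem.Str.isIn "error" (PySem.Str.lower e)) with
      | none => simp
      | some i => simp

theorem pv_alt_toList (l : List String) :
    (get_relevant_errors_alt l).toList =
      match l.findIdx? (fun e => PySem.Str.isIn "error" (PySem.Str.lower e)) with
      | none => []
      | some idx => ((l.drop idx).map (fun e => e.toList ++ ['\n'])).flatten := by
  unfold get_relevant_errors_alt
  cases h : l.findIdx? (fun e => PySem.Str.isIn "error" (PySem.Str.lower e)) with
  | none => simp
  | some idx =>
    simp only [PySem.Str.toList_join, PySem.List.slice_from_natCast, List.map_map]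
    rw [show "".toList = ([] : List Char) from rfl, pv_join_empty]
    simp [Function.comp_def]

-- ===== VERDICT (by name: the statement is the Claim_ definition above) =====
theorem get_relevant_errors_spec : Claim_equal_get_relevant_errors := by
  intro l _
  show get_relevant_errors l = get_relevant_errors_alt l
  apply String.toList_inj.mp
  rw [pv_alt_toList]
  unfold get_relevant_errors
  rw [garLoopA_false]
  exact String.toList_ofList
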